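-- pv_equiv track=rewrite | github.com/gaia-dpci/GaiaXPy | gaiaxpy/converter/config.py | __is_empty_string
-- ===== SOURCE A (Python) =====
-- def __is_empty_string(string: str):
--     def replace_empty_characters(s):
--         separator_chars = ['\n', '\t']
--         for ec in separator_chars:
--             s = s.replace(ec, '')
--         return s
--
--     string = replace_empty_characters(string)
--     for char in string:
--         if not char.isspace():
--             return False
--     return True
-- ===== SOURCE B (Python) =====
-- def __is_empty_string(string: str):
--     return not string.strip()
-- ===== Notes on version B (the rewrite author's own statement) =====
-- stated objective: simpler
-- what changed: Replaced the delete-newline/tab-then-scan-every-char-with-isspace loop by a single str.strip() call and an emptiness test (the deletions were redundant since both deleted characters are whitespace).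
import Mathlib
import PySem

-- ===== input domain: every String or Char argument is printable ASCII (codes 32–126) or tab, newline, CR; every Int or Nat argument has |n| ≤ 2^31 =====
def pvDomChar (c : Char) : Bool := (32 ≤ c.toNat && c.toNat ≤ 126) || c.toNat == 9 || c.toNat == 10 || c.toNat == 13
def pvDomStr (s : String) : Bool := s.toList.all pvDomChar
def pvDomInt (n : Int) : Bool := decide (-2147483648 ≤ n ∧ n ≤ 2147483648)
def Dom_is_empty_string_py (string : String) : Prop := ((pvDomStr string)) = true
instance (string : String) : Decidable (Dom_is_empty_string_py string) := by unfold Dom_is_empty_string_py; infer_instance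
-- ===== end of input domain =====

-- B replaces A's delete-newline/tab-then-isspace-scan loop by a single strip() call and emptiness test (simpler).

-- ===== PORT A =====
-- helper replace_empty_characters: for ec in ['\n','\t']: s = s.replace(ec, '')
def pvReplaceEmptyCharacters (s : String) : String :=
  ["\n", "\t"].foldl (fun s ec => PySem.Str.replace s ec "") s

-- for char in string: if not char.isspace(): return False; return True
def pvAllSpaceLoop : List Char → Bool
  | [] => true
  | c :: cs => if !(PySem.Chars.isspace c) then false else pvAllSpaceLoop cs

def is_empty_string_py (string : String) : Bool :=
  pvAllSpaceLoop (pvReplaceEmptyCharacters string).toList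

-- ===== PORT B =====
def is_empty_string_py_alt (string : String) : Bool :=
  PySem.Str.strip string == ""

-- ===== PRECONDITION & SPEC =====
def Spec_is_empty_string_py (string : String) (out : Bool) : Prop := out = is_empty_string_py_alt string
instance (string : String) (out : Bool) : Decidable (Spec_is_empty_string_py string out) := by unfold Spec_is_empty_string_py; infer_instance

-- ===== CLAIM (what is proved, stated in full; the proofs are below) =====
def Claim_equal_is_empty_string_py : Prop := ∀ (string : String), Dom_is_empty_string_py string → Spec_is_empty_string_py string (is_empty_string_py string)

-- ===== LEMMAS AND PROOFS =====

theorem pvAllSpaceLoop_eq_all (cs : List Char) :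
    pvAllSpaceLoop cs = cs.all PySem.Chars.isspace := by
  induction cs with
  | nil => rfl
  | cons c cs ih =>
    simp only [pvAllSpaceLoop, List.all_cons, ih]
    cases h : PySem.Chars.isspace c <;> simp

theorem replace_go_singleton (c : Char) (fuel : Nat) (l acc : List Char)
    (h : l.length ≤ fuel) :
    PySem.Chars.replace.go [c] [] fuel l acc = acc.reverse ++ l.filter (· ≠ c) := by
  induction fuel generalizing l acc with
  | zero =>
    have : l = [] := List.length_eq_zero_iff.mp (Nat.le_zero.mp h)
    subst this; rfl
  | succ fuel ih =>
    cases l with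
    | nil => rw [PySem.Chars.replace.go] <;> simp
    | cons d t =>
      have ht : t.length ≤ fuel := by simpa using h
      by_cases hd : d = c
      · subst hd
        have hpre : List.isPrefixOf [d] (d :: t) = true := by
          simp [List.isPrefixOf]
        rw [PySem.Chars.replace.go, if_pos hpre]
        simp only [List.length_cons, List.length_nil, Nat.zero_add, List.drop_succ_cons,
          List.drop_zero, List.reverse_nil, List.nil_append]
        rw [ih t acc ht]
        simp
      · have hpre : List.isPrefixOf [c] (d :: t) = false := by
          simp [List.isPrefixOf, BEq.beq]
          intro hh; exact hd hh.symm
        rw [PySem.Chars.replace.go, if_neg (by simp [hpre])]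
        rw [ih t (d :: acc) ht]
        simp [hd]

theorem replace_singleton_empty (s : List Char) (c : Char) :
    PySem.Chars.replace s [c] [] = s.filter (· ≠ c) := by
  rw [PySem.Chars.replace]
  simp only [List.isEmpty_cons, if_false, Bool.false_eq_true]
  exact replace_go_singleton c s.length s [] le_rfl

theorem strip_eq_nil_iff (cs : List Char) :
    PySem.Chars.strip cs = [] ↔ ∀ x ∈ cs, PySem.Chars.isspace x = true := by
  unfold PySem.Chars.strip PySem.Chars.rstrip PySem.Chars.lstrip
  constructor
  · intro h x hx
    have h' : List.dropWhile PySem.Chars.isspace (List.dropWhile PySem.Chars.isspace cs).reverse = [] := by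
      simpa using congrArg List.reverse h
    have hall : ∀ y ∈ (List.dropWhile PySem.Chars.isspace cs).reverse, PySem.Chars.isspace y = true :=
      List.dropWhile_eq_nil_iff.mp h'
    have hdec : cs = cs.takeWhile PySem.Chars.isspace ++ cs.dropWhile PySem.Chars.isspace :=
      (List.takeWhile_append_dropWhile).symm
    rw [hdec] at hx
    rcases List.mem_append.mp hx with h1 | h2
    · exact List.mem_takeWhile_imp h1
    · exact hall x (List.mem_reverse.mpr h2)
  · intro h
    rw [List.dropWhile_eq_nil_iff.mpr h]
    rfl

theorem is_empty_string_py_spec : Claim_equal_is_empty_string_py := by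
  intro s _
  unfold Spec_is_empty_string_py is_empty_string_py is_empty_string_py_alt pvReplaceEmptyCharacters
  rw [pvAllSpaceLoop_eq_all]
  simp only [List.foldl_cons, List.foldl_nil]
  rw [show (PySem.Str.replace (PySem.Str.replace s "\n" "") "\t" "").toList
        = ((s.toList.filter (· ≠ '\n')).filter (· ≠ '\t')) by
    rw [PySem.Str.toList_replace, PySem.Str.toList_replace]
    rw [show ("\n" : String).toList = ['\n'] from rfl, show ("\t" : String).toList = ['\t'] from rfl,
        show ("" : String).toList = [] from rfl]
    rw [replace_singleton_empty, replace_singleton_empty]]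
  have hB : (PySem.Str.strip s == "") = decide (PySem.Chars.strip s.toList = []) := by
    unfold PySem.Str.strip
    apply Bool.eq_iff_iff.mpr
    simp only [beq_iff_eq, decide_eq_true_iff]
    constructor
    · intro h
      have := congrArg String.toList h
      simpa using this
    · intro h; rw [h]
  rw [hB]
  by_cases hall : ∀ x ∈ s.toList, PySem.Chars.isspace x = true
  · rw [decide_eq_true ((strip_eq_nil_iff _).mpr hall)]
    apply List.all_eq_true.mpr
    intro x hx
    exact hall x (List.mem_of_mem_filter (List.mem_of_mem_filter hx))
  · rw [decide_eq_false (fun h => hall ((strip_eq_nil_iff _).mp h))]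
    apply Bool.not_eq_true _ |>.mp
    intro hc
    apply hall
    intro x hx
    by_cases h1 : x = '\n'
    · subst h1; decide
    · by_cases h2 : x = '\t'
      · subst h2; decide
      · exact List.all_eq_true.mp hc x (by
          refine List.mem_filter.mpr ⟨List.mem_filter.mpr ⟨hx, ?_⟩, ?_⟩ <;> simp [h1, h2])
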